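-- pv_equiv track=rewrite | github.com/Workwrite-Niidome/voynich-manuscript-analysis | archive/scripts/within_page_analysis.py | get_word_suffix
-- ===== SOURCE A (Python) =====
-- def get_word_suffix(word):
--     """Get the suffix category of a word."""
--     suffixes = [
--         ('aiin', '-aiin'),
--         ('ain', '-ain'),
--         ('iin', '-iin'),
--         ('am', '-am'),
--         ('ol', '-ol'),
--         ('or', '-or'),
--         ('ar', '-ar'),
--         ('al', '-al'),
--         ('an', '-an'),
--         ('ey', '-ey'),
--         ('dy', '-dy'),
--         ('chy', '-chy'),
--         ('shy', '-shy'),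
--         ('ty', '-ty'),
--         ('ry', '-ry'),
--         ('ly', '-ly'),
--         ('y', '-y'),
--         ('om', '-om'),
--         ('os', '-os'),
--         ('es', '-es'),
--         ('od', '-od'),
--     ]
--     for sfx, label in suffixes:
--         if word.endswith(sfx) and len(word) > len(sfx):
--             return label
--     return 'other'
-- ===== SOURCE B (Python) =====
-- def get_word_suffix(word):
--     """Get the suffix category of a word.
--
--     Decision procedure on the reversed character sequence: branch on the last
--     character, then refine by the preceding characters -- no suffix table.
--     """
--     r = list(reversed(word))
--     n = len(word)
--     if not r:
--         return 'other'
--     c = r[0]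
--     if c == 'n':
--         if r[1:4] == ['i', 'i', 'a'] and n > 4:
--             return '-aiin'
--         if r[1:3] == ['i', 'a'] and n > 3:
--             return '-ain'
--         if r[1:3] == ['i', 'i'] and n > 3:
--             return '-iin'
--         if r[1:2] == ['a'] and n > 2:
--             return '-an'
--         return 'other'
--     if c == 'm':
--         if r[1:2] == ['a'] and n > 2:
--             return '-am'
--         if r[1:2] == ['o'] and n > 2:
--             return '-om'
--         return 'other'
--     if c == 'l':
--         if r[1:2] == ['o'] and n > 2:
--             return '-ol'
--         if r[1:2] == ['a'] and n > 2:
--             return '-al'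
--         return 'other'
--     if c == 'r':
--         if r[1:2] == ['o'] and n > 2:
--             return '-or'
--         if r[1:2] == ['a'] and n > 2:
--             return '-ar'
--         return 'other'
--     if c == 'y':
--         if r[1:2] == ['e'] and n > 2:
--             return '-ey'
--         if r[1:2] == ['d'] and n > 2:
--             return '-dy'
--         if r[1:3] == ['h', 'c'] and n > 3:
--             return '-chy'
--         if r[1:3] == ['h', 's'] and n > 3:
--             return '-shy'
--         if r[1:2] == ['t'] and n > 2:
--             return '-ty'
--         if r[1:2] == ['r'] and n > 2:
--             return '-ry'
--         if r[1:2] == ['l'] and n > 2: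
--             return '-ly'
--         if n > 1:
--             return '-y'
--         return 'other'
--     if c == 's':
--         if r[1:2] == ['o'] and n > 2:
--             return '-os'
--         if r[1:2] == ['e'] and n > 2:
--             return '-es'
--         return 'other'
--     if c == 'd':
--         if r[1:2] == ['o'] and n > 2:
--             return '-od'
--         return 'other'
--     return 'other'
-- ===== Notes on version B (the rewrite author's own statement) =====
-- stated objective: alternative
-- what changed: Replaces the 21-entry priority-list scan of endswith checks by a decision procedure on the reversed character sequence: branch on the last character, then refine by the preceding characters with per-length guards; correct because the table's first-match order coincides with last-character grouping plus longest-suffix-wins within each group.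
import Mathlib
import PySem

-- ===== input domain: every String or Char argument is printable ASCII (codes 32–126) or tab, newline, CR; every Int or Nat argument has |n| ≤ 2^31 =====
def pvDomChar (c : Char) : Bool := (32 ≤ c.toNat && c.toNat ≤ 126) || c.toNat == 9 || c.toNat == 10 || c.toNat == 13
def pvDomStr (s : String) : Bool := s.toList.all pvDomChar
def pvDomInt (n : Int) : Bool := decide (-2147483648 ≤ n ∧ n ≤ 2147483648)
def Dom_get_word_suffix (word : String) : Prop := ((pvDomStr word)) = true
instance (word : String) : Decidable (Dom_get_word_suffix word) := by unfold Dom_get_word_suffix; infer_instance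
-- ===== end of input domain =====

-- B replaces A's 21-entry priority-list scan by a decision procedure on the reversed
-- character sequence (branch on the last character, refine by the preceding ones) — alternative structure, same result.


-- ===== PORT A =====
def gwsSuffixes : List (String × String) :=
  [("aiin", "-aiin"), ("ain", "-ain"), ("iin", "-iin"), ("am", "-am"), ("ol", "-ol"),
   ("or", "-or"), ("ar", "-ar"), ("al", "-al"), ("an", "-an"), ("ey", "-ey"),
   ("dy", "-dy"), ("chy", "-chy"), ("shy", "-shy"), ("ty", "-ty"), ("ry", "-ry"),
   ("ly", "-ly"), ("y", "-y"), ("om", "-om"), ("os", "-os"), ("es", "-es"), ("od", "-od")]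

-- the 'for sfx, label in suffixes' loop with its early return
def gwsLoop (word : String) : List (String × String) → String
  | [] => "other"
  | (sfx, label) :: rest =>
    if PySem.Str.endswith word sfx = true ∧ PySem.Str.len word > PySem.Str.len sfx
    then label else gwsLoop word rest

def get_word_suffix (word : String) : String := gwsLoop word gwsSuffixes

-- ===== PORT B =====
-- r = list(reversed(word)); n = len(word); branch on r[0], refine on r[1:k]
def get_word_suffix_alt (word : String) : String :=
  let r := word.toList.reverse
  let n := word.toList.length
  match r with
  | [] => "other"
  | c :: t =>
    if c = 'n' then
      if t.take 3 = ['i', 'i', 'a'] ∧ n > 4 then "-aiin"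
      else if t.take 2 = ['i', 'a'] ∧ n > 3 then "-ain"
      else if t.take 2 = ['i', 'i'] ∧ n > 3 then "-iin"
      else if t.take 1 = ['a'] ∧ n > 2 then "-an"
      else "other"
    else if c = 'm' then
      if t.take 1 = ['a'] ∧ n > 2 then "-am"
      else if t.take 1 = ['o'] ∧ n > 2 then "-om"
      else "other"
    else if c = 'l' then
      if t.take 1 = ['o'] ∧ n > 2 then "-ol"
      else if t.take 1 = ['a'] ∧ n > 2 then "-al"
      else "other"
    else if c = 'r' then
      if t.take 1 = ['o'] ∧ n > 2 then "-or"
      else if t.take 1 = ['a'] ∧ n > 2 then "-ar"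
      else "other"
    else if c = 'y' then
      if t.take 1 = ['e'] ∧ n > 2 then "-ey"
      else if t.take 1 = ['d'] ∧ n > 2 then "-dy"
      else if t.take 2 = ['h', 'c'] ∧ n > 3 then "-chy"
      else if t.take 2 = ['h', 's'] ∧ n > 3 then "-shy"
      else if t.take 1 = ['t'] ∧ n > 2 then "-ty"
      else if t.take 1 = ['r'] ∧ n > 2 then "-ry"
      else if t.take 1 = ['l'] ∧ n > 2 then "-ly"
      else if n > 1 then "-y"
      else "other"
    else if c = 's' then
      if t.take 1 = ['o'] ∧ n > 2 then "-os"
      else if t.take 1 = ['e'] ∧ n > 2 then "-es"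
      else "other"
    else if c = 'd' then
      if t.take 1 = ['o'] ∧ n > 2 then "-od"
      else "other"
    else "other"

-- ===== PRECONDITION & SPEC =====
def Spec_get_word_suffix (word : String) (out : String) : Prop := out = get_word_suffix_alt word
instance (word : String) (out : String) : Decidable (Spec_get_word_suffix word out) := by unfold Spec_get_word_suffix; infer_instance

-- ===== CLAIM (what is proved, stated in full; the proofs are below) =====
def Claim_equal_get_word_suffix : Prop := ∀ (word : String), Dom_get_word_suffix word → Spec_get_word_suffix word (get_word_suffix word)

-- ===== LEMMAS AND PROOFS =====

theorem gws_take_eq_of_prefix (l t : List Char) : (l <+: t) ↔ t.take l.length = l := by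
  rw [List.prefix_iff_eq_take, eq_comm]

theorem gws_take1 (t : List Char) (a : Char) : (t.take 1 = [a]) ↔ ([a] <+: t) := by
  rw [gws_take_eq_of_prefix]; norm_num

theorem gws_take2 (t : List Char) (a b : Char) : (t.take 2 = [a, b]) ↔ ([a, b] <+: t) := by
  rw [gws_take_eq_of_prefix]; norm_num

theorem gws_take3 (t : List Char) (a b c : Char) : (t.take 3 = [a, b, c]) ↔ ([a, b, c] <+: t) := by
  rw [gws_take_eq_of_prefix]; norm_num

theorem gws_main (word : String) : get_word_suffix word = get_word_suffix_alt word := by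
  unfold get_word_suffix get_word_suffix_alt
  have hr_aiin : "aiin".toList.reverse = ['n', 'i', 'i', 'a'] := by decide
  have hl_aiin : "aiin".toList.length = 4 := by decide
  have hr_ain : "ain".toList.reverse = ['n', 'i', 'a'] := by decide
  have hl_ain : "ain".toList.length = 3 := by decide
  have hr_iin : "iin".toList.reverse = ['n', 'i', 'i'] := by decide
  have hl_iin : "iin".toList.length = 3 := by decide
  have hr_am : "am".toList.reverse = ['m', 'a'] := by decide
  have hl_am : "am".toList.length = 2 := by decide
  have hr_ol : "ol".toList.reverse = ['l', 'o'] := by decide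
  have hl_ol : "ol".toList.length = 2 := by decide
  have hr_or : "or".toList.reverse = ['r', 'o'] := by decide
  have hl_or : "or".toList.length = 2 := by decide
  have hr_ar : "ar".toList.reverse = ['r', 'a'] := by decide
  have hl_ar : "ar".toList.length = 2 := by decide
  have hr_al : "al".toList.reverse = ['l', 'a'] := by decide
  have hl_al : "al".toList.length = 2 := by decide
  have hr_an : "an".toList.reverse = ['n', 'a'] := by decide
  have hl_an : "an".toList.length = 2 := by decide
  have hr_ey : "ey".toList.reverse = ['y', 'e'] := by decide
  have hl_ey : "ey".toList.length = 2 := by decide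
  have hr_dy : "dy".toList.reverse = ['y', 'd'] := by decide
  have hl_dy : "dy".toList.length = 2 := by decide
  have hr_chy : "chy".toList.reverse = ['y', 'h', 'c'] := by decide
  have hl_chy : "chy".toList.length = 3 := by decide
  have hr_shy : "shy".toList.reverse = ['y', 'h', 's'] := by decide
  have hl_shy : "shy".toList.length = 3 := by decide
  have hr_ty : "ty".toList.reverse = ['y', 't'] := by decide
  have hl_ty : "ty".toList.length = 2 := by decide
  have hr_ry : "ry".toList.reverse = ['y', 'r'] := by decide
  have hl_ry : "ry".toList.length = 2 := by decide
  have hr_ly : "ly".toList.reverse = ['y', 'l'] := by decide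
  have hl_ly : "ly".toList.length = 2 := by decide
  have hr_y : "y".toList.reverse = ['y'] := by decide
  have hl_y : "y".toList.length = 1 := by decide
  have hr_om : "om".toList.reverse = ['m', 'o'] := by decide
  have hl_om : "om".toList.length = 2 := by decide
  have hr_os : "os".toList.reverse = ['s', 'o'] := by decide
  have hl_os : "os".toList.length = 2 := by decide
  have hr_es : "es".toList.reverse = ['s', 'e'] := by decide
  have hl_es : "es".toList.length = 2 := by decide
  have hr_od : "od".toList.reverse = ['d', 'o'] := by decide
  have hl_od : "od".toList.length = 2 := by decide
  simp only [gwsSuffixes, gwsLoop, PySem.Str.endswith_eq, PySem.Str.len_eq,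
    PySem.Chars.endswith_iff, ← List.reverse_prefix, hr_aiin, hr_ain, hr_iin, hr_am, hr_ol, hr_or, hr_ar, hr_al, hr_an, hr_ey, hr_dy, hr_chy, hr_shy, hr_ty, hr_ry, hr_ly, hr_y, hr_om, hr_os, hr_es, hr_od, hl_aiin, hl_ain, hl_iin, hl_am, hl_ol, hl_or, hl_ar, hl_al, hl_an, hl_ey, hl_dy, hl_chy, hl_shy, hl_ty, hl_ry, hl_ly, hl_y, hl_om, hl_os, hl_es, hl_od,
    gws_take1, gws_take2, gws_take3, gt_iff_lt, Nat.cast_ofNat, Nat.cast_one,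
    Nat.one_lt_cast]
  generalize word.toList.reverse = r
  rcases r with _ | ⟨c, t⟩
  · simp
  · simp only [List.cons_prefix_cons, List.nil_prefix, and_true]
    by_cases hn : c = 'n'
    · subst hn; simp
    by_cases hm : c = 'm'
    · subst hm; simp
    by_cases hl : c = 'l'
    · subst hl; simp
    by_cases hr : c = 'r'
    · subst hr; simp
    by_cases hy : c = 'y'
    · subst hy; simp
    by_cases hs : c = 's'
    · subst hs; simp
    by_cases hd : c = 'd'
    · subst hd; simp
    simp [Ne.symm hn, Ne.symm hm, Ne.symm hl, Ne.symm hr, Ne.symm hy, Ne.symm hs, Ne.symm hd,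
      hn, hm, hl, hr, hy, hs, hd]

-- ===== VERDICT (by name: the statement is the Claim_ definition above) =====
theorem get_word_suffix_spec : Claim_equal_get_word_suffix := by
  intro word _
  exact gws_main word
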